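-- pv_equiv track=rewrite | github.com/hcji/seq_encode | encoder/peptide.py | peptide_split
-- ===== SOURCE A (Python) =====
-- def peptide_split(p):
--     split = []
--     temp = ''
--     for char in p:
--         if char == '_':
--             continue
--         elif (char != '[') and (char != ']'):
--             if temp == '':
--                 split.append(char)
--             else:
--                 temp += char
--         elif char == '[':
--             temp += char
--         else:
--             temp += char
--             split.append(temp)
--             temp = ''
--     return split
-- ===== SOURCE B (Python) =====
-- def peptide_split(p):
--     s = p.replace('_', '')
--     out = []
--     i = 0
--     n = len(s)
--     while i < n:
--         if s[i] == '[':
--             j = s.find(']', i)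
--             if j == -1:
--                 break  # unterminated group: nothing more is emitted
--             out.append(s[i:j + 1])
--             i = j + 1
--         else:
--             out.append(s[i])
--             i += 1
--     return out
-- ===== Notes on version B (the rewrite author's own statement) =====
-- stated objective: simpler
-- what changed: Replaces the char-by-char temp-accumulator state machine with: strip underscores up front, then scan emitting either a bracket-group slice found with a single find(']') jump or a single character.
import Mathlib
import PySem

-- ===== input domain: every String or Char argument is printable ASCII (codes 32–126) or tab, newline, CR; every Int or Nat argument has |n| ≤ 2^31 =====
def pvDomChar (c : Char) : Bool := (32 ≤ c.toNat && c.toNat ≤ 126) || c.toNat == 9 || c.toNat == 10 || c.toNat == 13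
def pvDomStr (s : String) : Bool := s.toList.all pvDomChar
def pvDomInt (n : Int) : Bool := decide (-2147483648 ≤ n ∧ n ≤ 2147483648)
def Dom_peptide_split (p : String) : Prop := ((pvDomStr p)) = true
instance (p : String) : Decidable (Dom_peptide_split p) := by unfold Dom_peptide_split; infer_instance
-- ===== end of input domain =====

-- B replaces A's char-by-char temp-accumulator state machine with: strip underscores, then
-- scan emitting either a '['…']' slice (found in one jump) or a single character (objective: simpler).

-- ===== PORT A =====
-- state: (split, temp); temp is the pending characters of an open '[...' group
def pepStepA (st : List String × List Char) (c : Char) : List String × List Char :=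
  if c = '_' then st
  else if c ≠ '[' ∧ c ≠ ']' then
    if st.2 = [] then (st.1 ++ [String.ofList [c]], st.2) else (st.1, st.2 ++ [c])
  else if c = '[' then (st.1, st.2 ++ [c])
  else (st.1 ++ [String.ofList (st.2 ++ [c])], [])

def peptide_split (p : String) : List String :=
  (p.toList.foldl pepStepA ([], [])).1

-- ===== PORT B =====
-- after '[': take up to the first ']' (s.find(']', i) and the slice s[i:j+1]);
-- no ']' ahead (find returns -1) = break: nothing more is emitted
def pepGoB : List Char → List String
  | [] => []
  | c :: rest =>
    if c = '[' then
      if (rest.dropWhile (· ≠ ']')).isEmpty then []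
      else String.ofList ('[' :: rest.takeWhile (· ≠ ']') ++ [']']) ::
        pepGoB (rest.dropWhile (· ≠ ']')).tail
    else String.ofList [c] :: pepGoB rest
termination_by l => l.length
decreasing_by
  · have h1 := List.length_dropWhile_le (p := fun x => !decide (x = ']')) (l := rest)
    have h2 := List.length_tail (l := rest.dropWhile (fun x => !decide (x = ']')))
    simp only [gt_iff_lt]
    simp at h1 h2 ⊢
    omega
  · simp

def peptide_split_alt (p : String) : List String :=
  pepGoB (p.toList.filter (· ≠ '_'))

-- ===== PRECONDITION & SPEC =====
def Spec_peptide_split (p : String) (out : List String) : Prop := out = peptide_split_alt p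
instance (p : String) (out : List String) : Decidable (Spec_peptide_split p out) := by unfold Spec_peptide_split; infer_instance

-- ===== CLAIM (what is proved, stated in full; the proofs are below) =====
def Claim_equal_peptide_split : Prop := ∀ (p : String), Dom_peptide_split p → Spec_peptide_split p (peptide_split p)

-- ===== LEMMAS AND PROOFS =====

-- A's fold skips underscores
theorem foldA_filter (l : List Char) (st : List String × List Char) :
    l.foldl pepStepA st = (l.filter (· ≠ '_')).foldl pepStepA st := by
  induction l generalizing st with
  | nil => rfl
  | cons c rest ih =>
    by_cases hc : c = '_'
    · subst hc
      simp [List.filter, pepStepA, ih]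
    · simp [List.filter, hc, List.foldl, ih]

-- unfolding lemmas for pepGoB
theorem pepGoB_plain {c : Char} (rest : List Char) (hc : c ≠ '[') :
    pepGoB (c :: rest) = String.ofList [c] :: pepGoB rest := by
  rw [pepGoB]
  simp [hc]

theorem pepGoB_open_nil (rest : List Char) (h : rest.dropWhile (· ≠ ']') = []) :
    pepGoB ('[' :: rest) = [] := by
  rw [pepGoB, if_pos rfl, h]
  rfl

theorem pepGoB_open_cons (rest : List Char) {close : Char} {tail : List Char}
    (h : rest.dropWhile (· ≠ ']') = close :: tail) :
    pepGoB ('[' :: rest) =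
      String.ofList ('[' :: rest.takeWhile (· ≠ ']') ++ [']']) :: pepGoB tail := by
  rw [pepGoB, if_pos rfl, h]
  rfl

-- open-group phase, no closing ']' ahead: nothing more is appended
theorem foldA_open_nil (l : List Char) (acc : List String) (t : List Char)
    (hu : '_' ∉ l) (ht : t ≠ []) (h : l.dropWhile (· ≠ ']') = []) :
    (l.foldl pepStepA (acc, t)).1 = acc := by
  induction l generalizing t with
  | nil => simp
  | cons c rest ih =>
    have hc : c ≠ '_' := by intro hx; exact hu (hx ▸ List.mem_cons_self)
    have hu' : '_' ∉ rest := fun hx => hu (List.mem_cons_of_mem _ hx)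
    by_cases hcb : c = ']'
    · rw [List.dropWhile_cons, if_neg (by simp [hcb])] at h
      simp at h
    · rw [List.dropWhile_cons, if_pos (by simp [hcb])] at h
      have hstep : pepStepA (acc, t) c = (acc, t ++ [c]) := by
        by_cases hl : c = '[' <;> simp_all [pepStepA]
      rw [List.foldl, hstep]
      exact ih (t ++ [c]) hu' (by simp) h

-- open-group phase, a closing ']' ahead: emit temp ++ chars up to it, then continue clean
theorem foldA_open_cons (l : List Char) (acc : List String) (t : List Char)
    {close : Char} {tail : List Char}
    (hu : '_' ∉ l) (ht : t ≠ []) (h : l.dropWhile (· ≠ ']') = close :: tail) :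
    (l.foldl pepStepA (acc, t)).1 =
      ((tail.foldl pepStepA
        (acc ++ [String.ofList (t ++ l.takeWhile (· ≠ ']') ++ [']'])], [])).1) := by
  induction l generalizing acc t with
  | nil => simp at h
  | cons c rest ih =>
    have hc : c ≠ '_' := by intro hx; exact hu (hx ▸ List.mem_cons_self)
    have hu' : '_' ∉ rest := fun hx => hu (List.mem_cons_of_mem _ hx)
    by_cases hcb : c = ']'
    · subst hcb
      rw [List.dropWhile_cons, if_neg (by simp)] at h
      injection h with h1 h2
      subst h2
      have hstep : pepStepA (acc, t) ']' = (acc ++ [String.ofList (t ++ [']'])], []) := by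
        simp [pepStepA]
      rw [List.foldl, hstep, List.takeWhile_cons, if_neg (by simp)]
      simp
    · rw [List.dropWhile_cons, if_pos (by simp [hcb])] at h
      have hstep : pepStepA (acc, t) c = (acc, t ++ [c]) := by
        by_cases hl : c = '[' <;> simp_all [pepStepA]
      rw [List.foldl, hstep, ih acc (t ++ [c]) hu' (by simp) h,
        List.takeWhile_cons, if_pos (by simp [hcb])]
      simp

-- main phase (temp empty): A's fold from (acc, []) appends exactly B's tokens
theorem foldA_main (l : List Char) (acc : List String) (hu : '_' ∉ l) :
    (l.foldl pepStepA (acc, [])).1 = acc ++ pepGoB l := by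
  induction hn : l.length using Nat.strong_induction_on generalizing l acc with
  | _ n ih =>
  subst hn
  match l with
  | [] => simp [pepGoB]
  | c :: rest =>
    have hc : c ≠ '_' := by intro h; exact hu (h ▸ List.mem_cons_self)
    have hu' : '_' ∉ rest := fun h => hu (List.mem_cons_of_mem _ h)
    by_cases hl : c = '['
    · subst hl
      have hstep : pepStepA (acc, []) '[' = (acc, ['[']) := by
        simp [pepStepA]
      rw [List.foldl, hstep]
      match h : rest.dropWhile (· ≠ ']') with
      | [] =>
        rw [foldA_open_nil rest acc ['['] hu' (by simp) h, pepGoB_open_nil rest h]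
        simp
      | close :: tail =>
        have htl : tail.length < rest.length + 1 := by
          have := List.length_dropWhile_le (p := fun x => decide (x ≠ ']')) (l := rest)
          rw [h] at this; simp at this; omega
        have hutail : '_' ∉ tail := by
          intro hm
          exact hu' ((List.dropWhile_sublist (l := rest) (p := fun x => decide (x ≠ ']'))).mem
            (by rw [h]; exact List.mem_cons_of_mem _ hm))
        rw [foldA_open_cons rest acc ['['] hu' (by simp) h,
          ih tail.length htl tail _ hutail rfl, pepGoB_open_cons rest h]
        simp
    · have hstep : pepStepA (acc, []) c = (acc ++ [String.ofList [c]], []) := by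
        by_cases hcb : c = ']'
        · simp [pepStepA, hcb]
        · simp [pepStepA, hc, hl, hcb]
      rw [List.foldl, hstep, ih rest.length (by simp) rest _ hu' rfl, pepGoB_plain rest hl]
      simp

-- ===== VERDICT (by name: the statement is the Claim_ definition above) =====
theorem peptide_split_spec : Claim_equal_peptide_split := by
  intro p _
  unfold Spec_peptide_split peptide_split peptide_split_alt
  rw [foldA_filter]
  exact foldA_main _ [] (by simp)
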